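-- pv_equiv track=rewrite | github.com/hapdesw/Praktikum-ASA | Praktikum 2/PetakPetak.py | brute_force_maximize_neighbors
-- ===== SOURCE A (Python) =====
-- def brute_force_maximize_neighbors(N, M):
--     petak = [[0 for _ in range(M)] for _ in range(N)]
--     for i in range(N):
--         for j in range(M):
--             if (i + j) % 2 != 0:
--                 petak[i][j] = 1
--             else:
--                 petak[i][j] = 0
--     petak2 = '\n'.join([' '.join(map(str, N)) for N in petak])
--     return petak2
-- ===== SOURCE B (Python) =====
-- def brute_force_maximize_neighbors(N, M):
--     if N <= 0:
--         return ''
--     row_even = ' '.join(str(j % 2) for j in range(M))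
--     row_odd = ' '.join(str((j + 1) % 2) for j in range(M))
--     return '\n'.join(row_even if i % 2 == 0 else row_odd for i in range(N))
-- ===== Notes on version B (the rewrite author's own statement) =====
-- stated objective: simpler
-- what changed: Instead of filling an N-by-M matrix cell by cell with a nested loop and then formatting it, B builds the two distinct row strings once and selects one per row by the row index's parity.
import Mathlib
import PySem

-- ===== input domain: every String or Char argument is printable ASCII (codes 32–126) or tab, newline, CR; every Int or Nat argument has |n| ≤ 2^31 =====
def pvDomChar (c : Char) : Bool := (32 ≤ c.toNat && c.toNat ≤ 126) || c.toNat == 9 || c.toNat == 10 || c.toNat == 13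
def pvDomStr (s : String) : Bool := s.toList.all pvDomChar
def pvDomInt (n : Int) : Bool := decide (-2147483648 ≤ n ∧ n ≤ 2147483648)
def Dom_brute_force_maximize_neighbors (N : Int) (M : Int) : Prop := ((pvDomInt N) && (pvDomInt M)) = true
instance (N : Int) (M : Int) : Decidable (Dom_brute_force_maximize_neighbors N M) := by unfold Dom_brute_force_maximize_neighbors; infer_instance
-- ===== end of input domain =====

-- B replaces A's per-cell double loop over an N×M matrix by building the two distinct row
-- strings once and selecting one per row by the row index's parity (objective: simpler).

-- ===== PORT A =====
def brute_force_maximize_neighbors (N : Int) (M : Int) : String :=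
  -- petak = [[0 for _ in range(M)] for _ in range(N)]
  let petak0 : List (List Int) :=
    (PySem.List.pyRange 0 N 1).map (fun _ => (PySem.List.pyRange 0 M 1).map (fun _ => (0 : Int)))
  -- the nested for-loops; 'petak[i][j] = v' is p.set i ((p[i]).set j v)
  let petak : List (List Int) :=
    (PySem.List.pyRange 0 N 1).foldl (fun p i =>
      (PySem.List.pyRange 0 M 1).foldl (fun p j =>
        p.set i.toNat ((p.getD i.toNat []).set j.toNat
          (if PySem.Int.mod (i + j) 2 ≠ 0 then (1 : Int) else 0))) p) petak0
  -- petak2 = '\n'.join([' '.join(map(str, row)) for row in petak])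
  PySem.Str.join "\n" (petak.map (fun row => PySem.Str.join " " (row.map PySem.Int.toStr)))

-- ===== PORT B =====
def brute_force_maximize_neighbors_alt (N : Int) (M : Int) : String :=
  if N ≤ 0 then "" else
  let row_even := PySem.Str.join " "
    ((PySem.List.pyRange 0 M 1).map (fun j => PySem.Int.toStr (PySem.Int.mod j 2)))
  let row_odd := PySem.Str.join " "
    ((PySem.List.pyRange 0 M 1).map (fun j => PySem.Int.toStr (PySem.Int.mod (j + 1) 2)))
  PySem.Str.join "\n"
    ((PySem.List.pyRange 0 N 1).map (fun i =>
      if PySem.Int.mod i 2 == 0 then row_even else row_odd))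

-- ===== PRECONDITION & SPEC =====
def Spec_brute_force_maximize_neighbors (N : Int) (M : Int) (out : String) : Prop := out = brute_force_maximize_neighbors_alt N M
instance (N : Int) (M : Int) (out : String) : Decidable (Spec_brute_force_maximize_neighbors N M out) := by unfold Spec_brute_force_maximize_neighbors; infer_instance

-- ===== CLAIM (what is proved, stated in full; the proofs are below) =====
def Claim_equal_brute_force_maximize_neighbors : Prop := ∀ (N : Int) (M : Int), Dom_brute_force_maximize_neighbors N M → Spec_brute_force_maximize_neighbors N M (brute_force_maximize_neighbors N M)

-- ===== LEMMAS AND PROOFS =====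

-- the cell value A stores at (i, j)
def pvCell (i j : Int) : Int := if PySem.Int.mod (i + j) 2 ≠ 0 then (1 : Int) else 0

-- inner loop: repeatedly setting position j of row i is one set of row i with the row folded
lemma inner_fold_eq_set (js : List Int) (v : Int → Int) :
    ∀ (p : List (List Int)) (i : Nat), i < p.length →
    js.foldl (fun p j => p.set i ((p.getD i []).set j.toNat (v j))) p
      = p.set i (js.foldl (fun r j => r.set j.toNat (v j)) (p.getD i [])) := by
  induction js with
  | nil =>
      intro p i h
      simp [List.getD_eq_getElem?_getD, List.getElem?_eq_getElem h, List.set_getElem_self]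
  | cons j t ih =>
      intro p i h
      simp only [List.foldl_cons]
      rw [ih _ i (by simpa using h)]
      simp [List.set_set, List.getD_eq_getElem?_getD, h]

-- writing f k at every position k of a long-enough row realises the map
lemma row_fold_eq_map (f : Int → Int) :
    ∀ (m : Nat) (r : List Int), m ≤ r.length →
    ((List.range m).map (fun k : Nat => (k : Int))).foldl (fun r j => r.set j.toNat (f j)) r
      = (List.range m).map (fun (k : Nat) => f (k : Int)) ++ r.drop m := by
  intro m
  induction m with
  | zero =>
      intro r _
      simp only [List.range_zero, List.map_nil, List.foldl_nil, List.drop_zero, List.nil_append]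
  | succ m ih =>
      intro r h
      rw [List.range_succ]
      simp only [List.map_append, List.foldl_append, List.map_cons, List.map_nil,
        List.foldl_cons, List.foldl_nil]
      rw [ih r (by omega)]
      have hm : m < r.length := by omega
      have hlen : ((List.range m).map (fun (k : Nat) => f (k : Int))).length = m := by simp
      rw [List.drop_eq_getElem_cons hm]
      rw [show ((m : Int)).toNat = m by simp]
      rw [List.set_append_right m _ (le_of_eq hlen)]
      rw [hlen, Nat.sub_self, List.set_cons_zero]
      simp

-- outer loop: setting row k (once, for each k < n) of a long-enough matrix realises the map
lemma outer_fold_eq_map (G : Int → List Int → List Int) :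
    ∀ (n : Nat) (p : List (List Int)), n ≤ p.length →
    ((List.range n).map (fun k : Nat => (k : Int))).foldl
        (fun p i => p.set i.toNat (G i (p.getD i.toNat []))) p
      = (List.range n).map (fun (k : Nat) => G (k : Int) (p.getD k [])) ++ p.drop n := by
  intro n
  induction n with
  | zero =>
      intro p _
      simp only [List.range_zero, List.map_nil, List.foldl_nil, List.drop_zero, List.nil_append]
  | succ n ih =>
      intro p h
      rw [List.range_succ]
      simp only [List.map_append, List.foldl_append, List.map_cons, List.map_nil,
        List.foldl_cons, List.foldl_nil]
      rw [ih p (by omega)]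
      have hn : n < p.length := by omega
      have hlen : ((List.range n).map (fun (k : Nat) => G (k : Int) (p.getD k []))).length = n := by
        simp
      rw [show ((n : Int)).toNat = n by simp]
      have hget : ((List.range n).map (fun (k : Nat) => G (k : Int) (p.getD k [])) ++ p.drop n).getD n []
          = p.getD n [] := by
        rw [List.getD_append_right _ _ _ n (le_of_eq hlen)]
        rw [hlen, Nat.sub_self, List.drop_eq_getElem_cons hn]
        simp [List.getD_eq_getElem?_getD, List.getElem?_eq_getElem hn]
      rw [hget, List.drop_eq_getElem_cons hn]
      rw [List.set_append_right n _ (le_of_eq hlen)]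
      rw [hlen, Nat.sub_self, List.set_cons_zero]
      simp [List.getD_eq_getElem?_getD, List.getElem?_eq_getElem hn]

-- the inner loop's body rewritten row-at-a-time, as long as lengths are respected
lemma fold_bodies_eq (m : Nat) :
    ∀ (is : List Int) (p : List (List Int)), (∀ i ∈ is, i.toNat < p.length) →
    is.foldl (fun p i =>
        ((List.range m).map (fun k : Nat => (k : Int))).foldl (fun p j =>
          p.set i.toNat ((p.getD i.toNat []).set j.toNat
            (if PySem.Int.mod (i + j) 2 ≠ 0 then (1 : Int) else 0))) p) p
    = is.foldl (fun p i =>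
        p.set i.toNat (((List.range m).map (fun k : Nat => (k : Int))).foldl
          (fun r j => r.set j.toNat (pvCell i j)) (p.getD i.toNat []))) p := by
  intro is
  induction is with
  | nil => intro p _; rfl
  | cons i t ih =>
      intro p hmem
      simp only [List.foldl_cons, pvCell]
      rw [inner_fold_eq_set _ (fun j => if PySem.Int.mod (i + j) 2 ≠ 0 then (1 : Int) else 0)
        p i.toNat (hmem i (by simp))]
      exact ih _ (by intro x hx; simpa using hmem x (by simp [hx]))

-- A's matrix after the two loops is the map of pvCell over the index grid (Nat-range form)
lemma matrix_eq (n m : Nat) :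
    ((List.range n).map (fun k : Nat => (k : Int))).foldl (fun p i =>
        ((List.range m).map (fun k : Nat => (k : Int))).foldl (fun p j =>
          p.set i.toNat ((p.getD i.toNat []).set j.toNat
            (if PySem.Int.mod (i + j) 2 ≠ 0 then (1 : Int) else 0))) p)
      ((List.range n).map (fun _ => (List.range m).map (fun _ => (0 : Int))))
    = (List.range n).map (fun (k : Nat) =>
        (List.range m).map (fun (l : Nat) => pvCell (k : Int) (l : Int))) := by
  set zeros : List Int := (List.range m).map (fun _ => (0 : Int)) with hz
  set p0 : List (List Int) := (List.range n).map (fun _ => zeros) with hp0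
  have hp0len : p0.length = n := by simp [hp0]
  rw [fold_bodies_eq m _ p0 (by
    intro i hi
    simp only [List.mem_map, List.mem_range] at hi
    obtain ⟨k, hk, rfl⟩ := hi
    simp [hp0len]
    omega)]
  rw [outer_fold_eq_map (fun i r => ((List.range m).map (fun k : Nat => (k : Int))).foldl
        (fun r j => r.set j.toNat (pvCell i j)) r) n p0 (le_of_eq hp0len.symm)]
  have hdrop : p0.drop n = [] := by simp [hp0len]
  rw [hdrop, List.append_nil]
  apply List.map_congr_left
  intro k hk
  simp only [List.mem_range] at hk
  have hget : p0.getD k [] = zeros := by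
    have : k < p0.length := by omega
    simp [hp0, List.getD_eq_getElem?_getD, hk]
  rw [hget]
  rw [row_fold_eq_map (fun j => pvCell (k : Int) j) m zeros (by simp [hz])]
  simp [hz]

-- per-row: A's formatted row i equals B's parity-selected template row
lemma row_string_eq (m : Nat) (i : Int) :
    PySem.Str.join " " ((List.range m).map (fun x : Nat => PySem.Int.toStr (pvCell i (x : Int))))
    = if (PySem.Int.mod i 2 == 0) = true
      then PySem.Str.join " " ((List.range m).map (fun x : Nat => PySem.Int.toStr (PySem.Int.mod (x : Int) 2)))
      else PySem.Str.join " " ((List.range m).map (fun x : Nat => PySem.Int.toStr (PySem.Int.mod ((x : Int) + 1) 2))) := by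
  have hmod : ∀ a : Int, PySem.Int.mod a 2 = a % 2 := fun a =>
    PySem.Int.mod_eq_emod_of_pos (by norm_num)
  by_cases hi : PySem.Int.mod i 2 == 0
  · rw [if_pos hi]
    apply congrArg
    apply List.map_congr_left
    intro x _
    have hcell : pvCell i (x : Int) = PySem.Int.mod (x : Int) 2 := by
      simp only [beq_iff_eq, hmod] at hi
      simp only [pvCell, hmod]
      split_ifs with h <;> omega
    rw [hcell]
  · rw [if_neg hi]
    apply congrArg
    apply List.map_congr_left
    intro x _
    have hcell : pvCell i (x : Int) = PySem.Int.mod ((x : Int) + 1) 2 := by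
      simp only [beq_iff_eq, hmod] at hi
      simp only [pvCell, hmod]
      split_ifs with h <;> omega
    rw [hcell]

-- ===== VERDICT (by name: the statement is the Claim_ definition above) =====
theorem brute_force_maximize_neighbors_spec : Claim_equal_brute_force_maximize_neighbors := by
  intro N M _
  unfold Spec_brute_force_maximize_neighbors brute_force_maximize_neighbors brute_force_maximize_neighbors_alt
  by_cases hN : N ≤ 0
  · rw [if_pos hN, PySem.List.pyRange_one_eq_nil hN]
    simp [PySem.Str.join]
  rw [if_neg hN]
  simp only [PySem.List.pyRange_one, sub_zero, zero_add, List.map_map, Function.comp_def]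
  rw [matrix_eq N.toNat M.toNat]
  simp only [List.map_map, Function.comp_def]
  apply congrArg
  apply List.map_congr_left
  intro k hk
  exact row_string_eq M.toNat (k : Int)
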